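-- pv_equiv track=rewrite | github.com/MaxxMXSZ/Mx-Cogs | f1dex_predictions/f1dex_predictions.py | _detect_safety_events
-- ===== SOURCE A (Python) =====
-- from typing import Any, Dict, List, Optional, Tuple
--
-- def _detect_safety_events(race_control_rows: List[Dict[str, Any]]) -> Tuple[bool, bool]:
--     safety_car = False
--     red_flag = False
--     for row in race_control_rows:
--         message = str(row.get("message") or "").upper()
--         if (
--             "SAFETY CAR DEPLOYED" in message
--             or "VIRTUAL SAFETY CAR DEPLOYED" in message
--             or "VSC DEPLOYED" in message
--         ):
--             safety_car = True
--         if "RED FLAG" in message: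
--             red_flag = True
--         if safety_car and red_flag:
--             break
--     return safety_car, red_flag
-- ===== SOURCE B (Python) =====
-- from typing import Any, Dict, List, Tuple
--
-- _KEYWORDS = (
--     "SAFETY CAR DEPLOYED",
--     "VIRTUAL SAFETY CAR DEPLOYED",
--     "VSC DEPLOYED",
--     "RED FLAG",
-- )
--
--
-- def _detect_safety_events(race_control_rows: List[Dict[str, Any]]) -> Tuple[bool, bool]:
--     # Pass 1: normalize every message once.
--     messages = [str(row.get("message") or "").upper() for row in race_control_rows]
--     # Pass 2 (keyword-major): for each keyword, was it seen in any message?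
--     hit = {k: any(k in m for m in messages) for k in _KEYWORDS}
--     safety_car = (
--         hit["SAFETY CAR DEPLOYED"]
--         or hit["VIRTUAL SAFETY CAR DEPLOYED"]
--         or hit["VSC DEPLOYED"]
--     )
--     return safety_car, hit["RED FLAG"]
-- ===== Notes on version B (the rewrite author's own statement) =====
-- stated objective: alternative
-- what changed: A's fused row-major loop with two mutable flags and an early break is replaced by a staged keyword-major computation: one pass normalizes all messages, then a keyword->hit table is built by scanning the messages per keyword, and the pair is read off the table.
import Mathlib
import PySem

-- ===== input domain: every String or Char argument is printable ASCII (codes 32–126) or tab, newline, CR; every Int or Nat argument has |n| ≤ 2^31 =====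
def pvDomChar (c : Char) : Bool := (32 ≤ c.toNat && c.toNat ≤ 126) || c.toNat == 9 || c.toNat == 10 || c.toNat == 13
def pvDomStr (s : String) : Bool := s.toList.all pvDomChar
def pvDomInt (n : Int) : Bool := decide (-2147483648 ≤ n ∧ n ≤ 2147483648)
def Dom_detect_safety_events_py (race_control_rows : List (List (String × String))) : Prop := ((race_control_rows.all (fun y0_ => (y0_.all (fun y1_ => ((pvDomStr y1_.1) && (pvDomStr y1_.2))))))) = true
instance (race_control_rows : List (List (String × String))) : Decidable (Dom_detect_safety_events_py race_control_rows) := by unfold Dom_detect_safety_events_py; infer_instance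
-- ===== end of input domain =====

-- B replaces A's fused row-major loop (two mutable flags, early break) with a staged
-- keyword-major computation: normalize all messages once, build a keyword->hit table
-- by scanning the messages per keyword, and read the pair off the table (alternative; same cost).

-- ===== PORT A =====
-- A's for-loop with the two mutable flags and the early 'break'.
def pvALoop : List (List (String × String)) → Bool → Bool → Bool × Bool
  | [], safety_car, red_flag => (safety_car, red_flag)
  | row :: rest, safety_car, red_flag =>
    let message := PySem.Str.upper ((PySem.Dict.mk row).getD "message" "")
    let safety_car' :=
      if PySem.Str.isIn "SAFETY CAR DEPLOYED" message
          || PySem.Str.isIn "VIRTUAL SAFETY CAR DEPLOYED" message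
          || PySem.Str.isIn "VSC DEPLOYED" message then true else safety_car
    let red_flag' := if PySem.Str.isIn "RED FLAG" message then true else red_flag
    if safety_car' && red_flag' then (safety_car', red_flag')
    else pvALoop rest safety_car' red_flag'

def detect_safety_events_py (race_control_rows : List (List (String × String))) : Bool × Bool :=
  pvALoop race_control_rows false false

-- ===== PORT B =====
def pvKeywords : List String :=
  ["SAFETY CAR DEPLOYED", "VIRTUAL SAFETY CAR DEPLOYED", "VSC DEPLOYED", "RED FLAG"]

def detect_safety_events_py_alt (race_control_rows : List (List (String × String))) : Bool × Bool :=
  -- Pass 1: normalize every message once.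
  let messages := race_control_rows.map
    (fun row => PySem.Str.upper ((PySem.Dict.mk row).getD "message" ""))
  -- Pass 2 (keyword-major dict comprehension): for each keyword, was it seen in any message?
  let hit : PySem.Dict String Bool :=
    pvKeywords.foldl (fun d k => d.insert k (messages.any (fun m => PySem.Str.isIn k m)))
      PySem.Dict.empty
  let safety_car :=
    hit.getD "SAFETY CAR DEPLOYED" false
      || hit.getD "VIRTUAL SAFETY CAR DEPLOYED" false
      || hit.getD "VSC DEPLOYED" false
  (safety_car, hit.getD "RED FLAG" false)

-- ===== PRECONDITION & SPEC =====
def Spec_detect_safety_events_py (race_control_rows : List (List (String × String))) (out : Bool × Bool) : Prop := out = detect_safety_events_py_alt race_control_rows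
instance (race_control_rows : List (List (String × String))) (out : Bool × Bool) : Decidable (Spec_detect_safety_events_py race_control_rows out) := by unfold Spec_detect_safety_events_py; infer_instance

-- ===== CLAIM (what is proved, stated in full; the proofs are below) =====
def Claim_equal_detect_safety_events_py : Prop := ∀ (race_control_rows : List (List (String × String))), Dom_detect_safety_events_py race_control_rows → Spec_detect_safety_events_py race_control_rows (detect_safety_events_py race_control_rows)

-- ===== LEMMAS AND PROOFS =====
-- B's per-row predicates, used only to state the lemmas relating the two ports.
def pvMessage (row : List (String × String)) : String :=
  PySem.Str.upper ((PySem.Dict.mk row).getD "message" "")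

def pvIsSC (m : String) : Bool :=
  PySem.Str.isIn "SAFETY CAR DEPLOYED" m
    || PySem.Str.isIn "VIRTUAL SAFETY CAR DEPLOYED" m
    || PySem.Str.isIn "VSC DEPLOYED" m

def pvIsRF (m : String) : Bool := PySem.Str.isIn "RED FLAG" m

-- One unfolding step of A's loop, phrased with the per-row predicates.
theorem pvALoop_cons (row : List (String × String)) (rest : List (List (String × String)))
    (sc rf : Bool) :
    pvALoop (row :: rest) sc rf =
      (if (sc || pvIsSC (pvMessage row)) && (rf || pvIsRF (pvMessage row)) then
        (sc || pvIsSC (pvMessage row), rf || pvIsRF (pvMessage row))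
      else pvALoop rest (sc || pvIsSC (pvMessage row)) (rf || pvIsRF (pvMessage row))) := by
  simp only [pvALoop, pvIsSC, pvIsRF, pvMessage]
  cases hc1 : PySem.Str.isIn "SAFETY CAR DEPLOYED" (PySem.Str.upper ((PySem.Dict.mk row).getD "message" ""))
      || PySem.Str.isIn "VIRTUAL SAFETY CAR DEPLOYED" (PySem.Str.upper ((PySem.Dict.mk row).getD "message" ""))
      || PySem.Str.isIn "VSC DEPLOYED" (PySem.Str.upper ((PySem.Dict.mk row).getD "message" "")) <;>
    cases hc2 : PySem.Str.isIn "RED FLAG" (PySem.Str.upper ((PySem.Dict.mk row).getD "message" "")) <;>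
      cases sc <;> cases rf <;> simp_all

-- Loop invariant: A's loop ORs each flag with the corresponding any() over the rest;
-- the early break only fires once both components are already true, so it is sound.
theorem pvALoop_eq (rows : List (List (String × String))) (sc rf : Bool) :
    pvALoop rows sc rf =
      (sc || (rows.map pvMessage).any pvIsSC, rf || (rows.map pvMessage).any pvIsRF) := by
  induction rows generalizing sc rf with
  | nil => simp [pvALoop]
  | cons row rest ih =>
    rw [pvALoop_cons]
    by_cases h : ((sc || pvIsSC (pvMessage row)) && (rf || pvIsRF (pvMessage row))) = true
    · rw [if_pos h]
      obtain ⟨h1, h2⟩ := Bool.and_eq_true_iff.mp h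
      simp only [List.map_cons, List.any_cons, ← Bool.or_assoc, h1, h2, Bool.true_or]
    · rw [if_neg h, ih]
      simp [Bool.or_assoc]

-- B's keyword-hit table read off: the four lookups are the four per-keyword any() scans,
-- so B's result is the component-wise any over the normalized messages.
theorem pvAny_or {α : Type} (l : List α) (f g : α → Bool) :
    l.any (fun x => f x || g x) = (l.any f || l.any g) := by
  induction l with
  | nil => rfl
  | cons x t ih => simp [List.any_cons, ih]; ac_rfl

-- B's keyword-hit table read off: the four lookups are the four per-keyword any() scans,
-- so B's result is the component-wise any over the normalized messages.
theorem alt_eq (rows : List (List (String × String))) :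
    detect_safety_events_py_alt rows =
      ((rows.map pvMessage).any pvIsSC, (rows.map pvMessage).any pvIsRF) := by
  simp only [detect_safety_events_py_alt, pvKeywords, List.foldl_cons, List.foldl_nil]
  simp only [PySem.Dict.getD, PySem.Dict.get?_insert_self]
  simp only [pvIsSC, pvIsRF, pvAny_or, List.any_map, pvMessage, Function.comp_def]
  simp [PySem.Dict.getD, PySem.Dict.get?_insert_self, PySem.Dict.get?_insert_of_ne]

-- ===== VERDICT (by name: the statement is the Claim_ definition above) =====
theorem detect_safety_events_py_spec : Claim_equal_detect_safety_events_py := by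
  intro rows _
  unfold Spec_detect_safety_events_py detect_safety_events_py
  rw [pvALoop_eq, alt_eq]
  simp
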